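-- pv_equiv track=rewrite | github.com/kalininalab/StructMAn | structman/lib/output/genes.py | produce_trace
-- ===== SOURCE A (Python) =====
-- def produce_trace(aligned_sequences):
--     n_rows = 0
--     n_cols = len(aligned_sequences)
--     for entry in aligned_sequences:
--         if len(entry) > n_rows:
--             n_rows = len(entry)
--
--     #initialize trace with -2
--     trace = [[-2 for _ in range(n_cols)] for _ in range(n_rows)]
--
--     column_i = 0
--     seq_j = 0
--     for seq_j, sequence in enumerate(aligned_sequences):
--         id_counter = 0
--         for column_i, symbol in enumerate(sequence):
--             if symbol == "-":
--                 trace_elem = -1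
--             else:
--                 trace_elem = id_counter
--                 id_counter+=1
--             trace[column_i][seq_j] = trace_elem
--     return trace
-- ===== SOURCE B (Python) =====
-- def produce_trace(aligned_sequences):
--     # Pass 1: per-sequence residue index columns.
--     cols = []
--     for seq in aligned_sequences:
--         vals = []
--         counter = 0
--         for sym in seq:
--             if sym == "-":
--                 vals.append(-1)
--             else:
--                 vals.append(counter)
--                 counter += 1
--         cols.append(vals)
--     # Pass 2: assemble rows by transposing, padding short columns with -2.
--     n_rows = max((len(c) for c in cols), default=0)
--     return [[col[i] if i < len(col) else -2 for col in cols] for i in range(n_rows)]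
-- ===== Notes on version B (the rewrite author's own statement) =====
-- stated objective: alternative
-- what changed: Replaces the pre-allocated -2 matrix mutated in place by nested indexed loops with a two-pass functional build: first compute each sequence's trace column independently, then transpose the columns into rows, padding ragged columns with -2.
import Mathlib
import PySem

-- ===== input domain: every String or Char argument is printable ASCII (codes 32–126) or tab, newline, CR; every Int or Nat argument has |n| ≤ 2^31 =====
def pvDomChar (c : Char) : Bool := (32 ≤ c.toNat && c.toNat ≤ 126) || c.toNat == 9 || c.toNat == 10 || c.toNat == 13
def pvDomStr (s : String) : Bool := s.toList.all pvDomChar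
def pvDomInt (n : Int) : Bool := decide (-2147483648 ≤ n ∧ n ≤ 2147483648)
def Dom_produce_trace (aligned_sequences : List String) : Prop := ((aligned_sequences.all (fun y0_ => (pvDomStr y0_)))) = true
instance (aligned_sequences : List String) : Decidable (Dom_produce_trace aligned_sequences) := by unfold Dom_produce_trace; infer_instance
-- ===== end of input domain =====

-- B replaces A's in-place mutation of a pre-allocated -2 matrix with a two-pass build:
-- per-sequence trace columns first, then a transpose with -2 padding (alternative decomposition, same cost).

-- ===== PORT A =====
-- inner loop: 'for column_i, symbol in enumerate(sequence): … trace[column_i][seq_j] = trace_elem'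
def pvFillSeq (trace : List (List Int)) (seq_j : Nat) (column_i : Nat) (id_counter : Int) :
    List Char → List (List Int)
  | [] => trace
  | symbol :: rest =>
    let trace_elem : Int := if symbol = '-' then -1 else id_counter
    let trace' := trace.modify column_i (fun row => row.set seq_j trace_elem)
    pvFillSeq trace' seq_j (column_i + 1) (if symbol = '-' then id_counter else id_counter + 1) rest

-- outer loop: 'for seq_j, sequence in enumerate(aligned_sequences): …'
def pvFillAll (trace : List (List Int)) (seq_j : Nat) : List String → List (List Int)
  | [] => trace
  | sequence :: rest => pvFillAll (pvFillSeq trace seq_j 0 0 sequence.toList) (seq_j + 1) rest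

def produce_trace (aligned_sequences : List String) : List (List Int) :=
  let n_cols := aligned_sequences.length
  let n_rows := aligned_sequences.foldl
    (fun m entry => if entry.toList.length > m then entry.toList.length else m) 0
  let trace := List.replicate n_rows (List.replicate n_cols (-2 : Int))
  pvFillAll trace 0 aligned_sequences

-- ===== PORT B =====
-- pass 1 inner loop of Source B: residue indices for one sequence
def pvColGo (id_counter : Int) : List Char → List Int
  | [] => []
  | c :: rest =>
    if c = '-' then (-1 : Int) :: pvColGo id_counter rest
    else id_counter :: pvColGo (id_counter + 1) rest

def produce_trace_alt (aligned_sequences : List String) : List (List Int) :=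
  let cols := aligned_sequences.map (fun s => pvColGo 0 s.toList)
  let n_rows := cols.foldl (fun m c => max m c.length) 0
  (List.range n_rows).map (fun i => cols.map (fun col => col.getD i (-2)))

-- ===== PRECONDITION & SPEC =====
def Spec_produce_trace (aligned_sequences : List String) (out : List (List Int)) : Prop := out = produce_trace_alt aligned_sequences
instance (aligned_sequences : List String) (out : List (List Int)) : Decidable (Spec_produce_trace aligned_sequences out) := by unfold Spec_produce_trace; infer_instance

-- ===== CLAIM (what is proved, stated in full; the proofs are below) =====
def Claim_equal_produce_trace : Prop := ∀ (aligned_sequences : List String), Dom_produce_trace aligned_sequences → Spec_produce_trace aligned_sequences (produce_trace aligned_sequences)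

-- ===== LEMMAS AND PROOFS =====

-- cell accessor used throughout the proof
def pvCell (t : List (List Int)) (i j : Nat) : Int := (t.getD i []).getD j 0

theorem pvColGo_length (cs : List Char) : ∀ k, (pvColGo k cs).length = cs.length := by
  induction cs with
  | nil => intro k; simp [pvColGo]
  | cons c rest ih => intro k; by_cases h : c = '-' <;> simp [pvColGo, h, ih]

theorem pvFillSeq_length (cs : List Char) : ∀ t j i0 k,
    (pvFillSeq t j i0 k cs).length = t.length := by
  induction cs with
  | nil => intro t j i0 k; simp [pvFillSeq]
  | cons c rest ih => intro t j i0 k; simp [pvFillSeq, ih]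

theorem pvFillSeq_rowlen (cs : List Char) : ∀ t j i0 k i,
    ((pvFillSeq t j i0 k cs).getD i []).length = (t.getD i []).length := by
  induction cs with
  | nil => intro t j i0 k i; simp [pvFillSeq]
  | cons c rest ih =>
    intro t j i0 k i
    simp only [pvFillSeq, ih]
    simp only [List.getD, List.getElem?_modify]
    by_cases h : i0 = i <;> simp [h] <;> cases t[i]? <;> simp

theorem pvFillSeq_cell (cs : List Char) : ∀ (t : List (List Int)) (j i0 : Nat) (k : Int)
    (_ : ∀ i', i' < t.length → j < (t.getD i' []).length) (i j' : Nat),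
    pvCell (pvFillSeq t j i0 k cs) i j' =
      if j' = j ∧ i0 ≤ i ∧ i - i0 < cs.length ∧ i < t.length
      then (pvColGo k cs).getD (i - i0) 0 else pvCell t i j' := by
  induction cs with
  | nil =>
    intro t j i0 k h i j'
    simp [pvFillSeq]
  | cons c rest ih =>
    intro t j i0 k h i j'
    simp only [pvFillSeq]
    set e : Int := if c = '-' then -1 else k with he
    set t' := t.modify i0 (fun row => row.set j e) with ht'
    have hlen' : t'.length = t.length := by simp [ht']
    have hrow' : ∀ i', ((t'.getD i' []).length) = ((t.getD i' []).length) := by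
      intro i'
      simp only [ht', List.getD, List.getElem?_modify]
      by_cases hcase : i0 = i' <;> simp [hcase] <;> cases t[i']? <;> simp
    have h' : ∀ i', i' < t'.length → j < (t'.getD i' []).length := by
      intro i' hi'; rw [hrow']; exact h i' (hlen' ▸ hi')
    have hcell' : ∀ ii jj, (ii ≠ i0 ∨ jj ≠ j ∨ t.length ≤ i0) →
        pvCell t' ii jj = pvCell t ii jj := by
      intro ii jj hne
      simp only [pvCell, ht', List.getD, List.getElem?_modify]
      by_cases hcase : i0 = ii
      · subst hcase
        cases hrow : t[i0]? with
        | none => simp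
        | some row =>
          have hin : i0 < t.length := by
            by_contra hge
            rw [List.getElem?_eq_none (by omega)] at hrow; simp at hrow
          have hjj : jj ≠ j := by
            rcases hne with h1 | h2 | h3
            · exact absurd rfl h1
            · exact h2
            · omega
          simp [List.getD, List.getElem?_set, Ne.symm hjj]
      · simp [hcase]
    rw [ih t' j (i0 + 1) (if c = '-' then k else k + 1) h' i j']
    by_cases hmain : j' = j ∧ i0 ≤ i ∧ i - i0 < (c :: rest).length ∧ i < t.length
    · obtain ⟨hj', hi0, hlt, hit⟩ := hmain
      by_cases hi0i : i0 = i
      · -- the element written at this step is the one read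
        have hnot : ¬ (j' = j ∧ i0 + 1 ≤ i ∧ i - (i0 + 1) < rest.length ∧ i < t'.length) := by
          intro ⟨_, hb, _, _⟩; omega
        rw [if_neg hnot, if_pos ⟨hj', hi0, hlt, hit⟩]
        subst hi0i
        have hrowlen := h i0 hit
        cases hrow : t[i0]? with
        | none => exact absurd hrow (by simp [hit])
        | some row =>
          have hjrow : j < row.length := by
            have := h i0 hit; simpa [List.getD, hrow] using this
          simp only [pvCell, ht', List.getD, List.getElem?_modify, hrow, if_pos rfl,
            Option.map_some, Option.getD_some, hj']
          by_cases hc : c = '-' <;>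
            simp [pvColGo, hc, he, List.getD, List.getElem?_set, hjrow]
      · have hi1 : i0 + 1 ≤ i := by omega
        have hcond : j' = j ∧ i0 + 1 ≤ i ∧ i - (i0 + 1) < rest.length ∧ i < t'.length :=
          ⟨hj', hi1, by simp at hlt; omega, by omega⟩
        have hcond2 : j' = j ∧ i0 ≤ i ∧ i - i0 < (c :: rest).length ∧ i < t.length :=
          ⟨hj', hi0, hlt, hit⟩
        rw [if_pos hcond, if_pos hcond2]
        have hsub : i - i0 = (i - (i0 + 1)) + 1 := by omega
        by_cases hc : c = '-' <;> simp [pvColGo, hc, hsub, List.getD]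
    · have hnot' : ¬ (j' = j ∧ i0 + 1 ≤ i ∧ i - (i0 + 1) < rest.length ∧ i < t'.length) := by
        intro ⟨a, b, cc, d⟩
        exact hmain ⟨a, by omega, by simp; omega, by omega⟩
      rw [if_neg hnot', if_neg hmain]
      apply hcell'
      by_cases h1 : i = i0
      · by_cases h2 : j' = j
        · right; right
          by_contra hge
          exact hmain ⟨h2, by omega, by simp; omega, by omega⟩
        · right; left; exact h2
      · left; exact h1

theorem pvFillAll_length (ys : List String) : ∀ t j0,
    (pvFillAll t j0 ys).length = t.length := by
  induction ys with
  | nil => intro t j0; simp [pvFillAll]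
  | cons s rest ih => intro t j0; simp [pvFillAll, ih, pvFillSeq_length]

theorem pvFillAll_rowlen (ys : List String) : ∀ t j0 i,
    ((pvFillAll t j0 ys).getD i []).length = (t.getD i []).length := by
  induction ys with
  | nil => intro t j0 i; simp [pvFillAll]
  | cons s rest ih =>
    intro t j0 i
    simp only [pvFillAll]
    rw [ih, pvFillSeq_rowlen]

theorem pvFillAll_cell (ys : List String) : ∀ (t : List (List Int)) (j0 C : Nat)
    (_ : ∀ i', i' < t.length → (t.getD i' []).length = C)
    (_ : j0 + ys.length ≤ C) (i j : Nat), i < t.length → j < C →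
    pvCell (pvFillAll t j0 ys) i j =
      if j0 ≤ j ∧ j - j0 < ys.length ∧ i < (ys.getD (j - j0) "").toList.length
      then (pvColGo 0 (ys.getD (j - j0) "").toList).getD i 0
      else pvCell t i j := by
  induction ys with
  | nil => intro t j0 C hC hle i j hi hj; simp [pvFillAll]
  | cons s rest ih =>
    intro t j0 C hC hle i j hi hj
    simp only [pvFillAll]
    set t' := pvFillSeq t j0 0 0 s.toList with ht'
    have hlen' : t'.length = t.length := pvFillSeq_length _ _ _ _ _
    have hC' : ∀ i', i' < t'.length → (t'.getD i' []).length = C := by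
      intro i' hi'; rw [ht', pvFillSeq_rowlen]; exact hC i' (by omega)
    have hle' : (j0 + 1) + rest.length ≤ C := by simp at hle; omega
    have hfill := pvFillSeq_cell s.toList t j0 0 0
      (fun i' hi' => by rw [hC i' hi']; omega) i j
    rw [ih t' (j0 + 1) C hC' hle' i j (by omega) hj]
    by_cases h0 : j = j0
    · subst h0
      have hrest : ¬ (j + 1 ≤ j ∧ j - (j + 1) < rest.length ∧
          i < ((rest.getD (j - (j + 1)) "").toList.length)) := by
        intro ⟨a, _⟩; omega
      rw [if_neg hrest, hfill]
      have hz : j - j = 0 := Nat.sub_self j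
      rw [hz]
      simp only [List.getD_cons_zero]
      by_cases hc : i < s.toList.length <;> simp [hc, hi]
    · have hfillne : pvCell t' i j = pvCell t i j := by
        rw [hfill, if_neg]; intro ⟨a, _⟩; exact h0 a
      by_cases hgt : j0 ≤ j
      · obtain ⟨m, hm⟩ : ∃ m, j - j0 = m + 1 := ⟨j - j0 - 1, by omega⟩
        have e1 : j - (j0 + 1) = m := by omega
        rw [e1, hm]
        simp only [List.getD_cons_succ]
        by_cases hc : m < rest.length ∧ i < (rest.getD m "").toList.length
        · rw [if_pos ⟨by omega, hc.1, hc.2⟩, if_pos ⟨hgt, by simp; omega, hc.2⟩]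
        · rw [if_neg (fun ⟨_, b, cc⟩ => hc ⟨b, cc⟩),
              if_neg (fun ⟨_, b, cc⟩ => hc ⟨by simp at b; omega, cc⟩)]
          exact hfillne
      · rw [if_neg (fun ⟨a, _⟩ => hgt (by omega)),
            if_neg (fun ⟨a, _⟩ => hgt a)]
        exact hfillne

theorem produce_trace_nrows (xs : List String) : ∀ m : Nat,
    xs.foldl (fun m entry => if entry.toList.length > m then entry.toList.length else m) m =
    (xs.map (fun s => pvColGo 0 s.toList)).foldl (fun m c => max m c.length) m := by
  induction xs with
  | nil => intro m; simp
  | cons s rest ih =>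
    intro m
    simp only [List.map_cons, List.foldl_cons, pvColGo_length]
    rw [← ih]
    have : (if s.toList.length > m then s.toList.length else m) = max m s.toList.length := by
      split_ifs <;> omega
    rw [this]

theorem produce_trace_eq (xs : List String) : produce_trace xs = produce_trace_alt xs := by
  simp only [produce_trace, produce_trace_alt]
  rw [← produce_trace_nrows xs 0]
  set C := xs.length with hCdef
  set R := xs.foldl (fun m entry => if entry.toList.length > m then entry.toList.length else m) 0
    with hRdef
  set t0 := List.replicate R (List.replicate C (-2 : Int)) with ht0
  have ht0len : t0.length = R := by simp [ht0]
  have hC : ∀ i', i' < t0.length → (t0.getD i' []).length = C := by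
    intro i' hi'
    rw [ht0len] at hi'
    simp [ht0, List.getD, List.getElem?_replicate, hi']
  apply List.ext_getElem
  · rw [pvFillAll_length]; simp [ht0]
  intro i h1 h2
  have hiR : i < R := by rw [pvFillAll_length, ht0len] at h1; exact h1
  apply List.ext_getElem
  · -- row lengths: C on both sides
    have hl : ((pvFillAll t0 0 xs)[i]).length = C := by
      rw [← List.getD_eq_getElem (pvFillAll t0 0 xs) [] h1, pvFillAll_rowlen]
      exact hC i (by omega)
    rw [hl]
    simp [hCdef]
  intro j hj1 hj2
  have hjC : j < C := by
    rw [← List.getD_eq_getElem (pvFillAll t0 0 xs) [] h1, pvFillAll_rowlen] at hj1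
    rw [hC i (by omega)] at hj1
    exact hj1
  -- right-hand side cell
  have hrhs : (((((List.range R).map
        (fun i => (xs.map (fun (s : String) => pvColGo 0 s.toList)).map (fun (col : List Int) => col.getD i (-2))))[i]'h2))[j]?).getD (0 : Int) = ((pvColGo 0 (xs[j]'(by simpa [hCdef] using hjC)).toList).getD i (-2)) := by
    simp [List.getElem_map, List.getElem_range, List.getElem?_map,
      List.getElem?_eq_getElem (by simpa [hCdef] using hjC : j < xs.length)]
  -- left-hand side cell via pvFillAll_cell
  have hlhs : pvCell (pvFillAll t0 0 xs) i j =
      if 0 ≤ j ∧ j - 0 < xs.length ∧ i < (xs.getD (j - 0) "").toList.length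
      then (pvColGo 0 (xs.getD (j - 0) "").toList).getD i 0
      else pvCell t0 i j :=
    pvFillAll_cell xs t0 0 C hC (by omega) i j (by omega) hjC
  have hcell0 : pvCell t0 i j = -2 := by
    simp [pvCell, ht0, List.getD, List.getElem?_replicate, hiR, hjC]
  have hgetD : xs.getD (j - 0) "" = xs[j]'(by simpa using hjC) := by
    simp [List.getD, List.getElem?_eq_getElem (show j < xs.length by simpa [hCdef] using hjC)]
  have hmain : pvCell (pvFillAll t0 0 xs) i j =
      (pvColGo 0 (xs[j]'(by simpa using hjC)).toList).getD i (-2) := by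
    rw [hlhs, hgetD, hcell0]
    by_cases hc : i < (xs[j]'(by simpa using hjC)).toList.length
    · rw [if_pos ⟨by omega, by simpa using hjC, hc⟩]
      have hlt : i < (pvColGo 0 (xs[j]'(by simpa using hjC)).toList).length := by
        rw [pvColGo_length]; exact hc
      rw [List.getD_eq_getElem _ _ hlt, List.getD_eq_getElem _ _ hlt]
    · rw [if_neg (fun ⟨_, _, a⟩ => hc a)]
      have hge : (pvColGo 0 (xs[j]'(by simpa using hjC)).toList).length ≤ i := by
        rw [pvColGo_length]; omega
      simp [List.getD, List.getElem?_eq_none hge]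
  -- put the two together
  have hL : ((((pvFillAll t0 0 xs)[i]'h1))[j]?).getD (0 : Int) = pvCell (pvFillAll t0 0 xs) i j := by
    simp [pvCell, List.getD, ← List.getD_eq_getElem (pvFillAll t0 0 xs) [] h1]
  have := hL.trans (hmain.trans hrhs.symm)
  have hjlt2 : j < (((List.range R).map
      (fun i => (xs.map (fun s => pvColGo 0 s.toList)).map (fun col => col.getD i (-2))))[i]'h2).length := hj2
  rw [List.getElem?_eq_getElem hj1, List.getElem?_eq_getElem hjlt2] at this
  simpa using this

-- ===== VERDICT (by name: the statement is the Claim_ definition above) =====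
theorem produce_trace_spec : Claim_equal_produce_trace := by
  intro xs _
  unfold Spec_produce_trace
  exact produce_trace_eq xs
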